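-- pv_equiv track=rewrite | github.com/blackjackal982/Mission-RND | p4.py | is_oct_magic
-- ===== SOURCE A (Python) =====
-- def check_magic(digits):
--     s = sum([i**2 for i in digits])
--     if s<8 and s>=0:
--         return s
--     else:
--         while s > 7:
--             a=[int(i) for i in list(oct(s)[2:])]
--             s = check_magic(a)
--         return s
--
-- def is_oct_magic(number):
--     if number<0:
--         raise ValueError
--     dig =[int(i) for i in list(oct(number)[2:])]
--     try:
--         if check_magic(dig) == 1:
--             return True
--         else:
--             return False
--     except RecursionError:
--         return False
-- ===== SOURCE B (Python) =====
-- def is_oct_magic(number):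
--     # Iterative happy-number check in base 8 with an explicit visited set
--     # (instead of nested recursion relying on RecursionError for cycles).
--     if number < 0:
--         raise ValueError
--     n = number
--     seen = set()
--     while True:
--         s = sum(int(d) ** 2 for d in oct(n)[2:])
--         if s < 8:
--             return s == 1
--         if s in seen:
--             return False
--         seen.add(s)
--         n = s
-- ===== Notes on version B (the rewrite author's own statement) =====
-- stated objective: idiomatic
-- what changed: Replaces the nested recursion (whose cycles are only stopped by catching RecursionError) with the standard iterative happy-number loop using an explicit visited set for cycle detection.
import Mathlib
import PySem

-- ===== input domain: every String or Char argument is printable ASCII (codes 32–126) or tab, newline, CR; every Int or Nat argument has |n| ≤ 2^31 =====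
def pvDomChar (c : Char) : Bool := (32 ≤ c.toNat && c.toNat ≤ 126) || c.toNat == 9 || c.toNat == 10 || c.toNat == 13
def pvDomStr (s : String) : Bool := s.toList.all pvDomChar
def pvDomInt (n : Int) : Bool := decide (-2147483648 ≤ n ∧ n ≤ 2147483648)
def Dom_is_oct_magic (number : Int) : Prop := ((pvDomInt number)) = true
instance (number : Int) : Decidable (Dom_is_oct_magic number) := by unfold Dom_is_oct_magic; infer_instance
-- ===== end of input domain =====

set_option maxRecDepth 10000
set_option maxHeartbeats 1000000


-- B replaces A's nested recursion (cycles only end via RecursionError) by the standard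
-- iterative visited-set happy-number loop; equivalence is proved on all non-negative inputs.

-- Shared helper: the int digits of oct(n)[2:] for n ≥ 0 (both Pythons call oct the same way).
-- Structural recursion on a fuel equal to n itself (the division chain is far shorter).
def pvOctDigitsAux : Nat → Nat → List Nat
  | 0, _ => []
  | fuel + 1, n => if n = 0 then [] else pvOctDigitsAux fuel (n / 8) ++ [n % 8]

def pvOctDigits (n : Int) : List Int :=
  if n = 0 then [0] else (pvOctDigitsAux n.toNat n.toNat).map (fun d : Nat => (d : Int))

-- ===== PORT A =====
-- while-loop of check_magic: bounded by a fuel that is never exhausted on the paths that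
-- matter (the recursive call below returns a value < 8 or none, so the loop body runs at
-- most once per entry); none models the propagating RecursionError.
def pvCheckWhile (step : Int → Option Int) : Nat → Int → Option Int
  | 0, _ => none
  | w + 1, s =>
    if s > 7 then
      match step s with
      | none => none
      | some s' => pvCheckWhile step w s'
    else some s

-- check_magic with an explicit recursion-depth fuel; fuel 0 = RecursionError (none).
def check_magic : Nat → List Int → Option Int
  | 0, _ => none
  | fuel + 1, digits =>
    let s := (digits.map (fun i => i ^ 2)).sum
    if s < 8 ∧ 0 ≤ s then some s
    else pvCheckWhile (fun t => check_magic fuel (pvOctDigits t)) (fuel + 1) s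

-- fuel 30 models CPython's finite recursion limit: for |number| ≤ 2^31 a terminating chain
-- reaches a value < 8 within a dozen nested calls (so any fuel ≥ that behaves identically),
-- and a non-terminating cycle exhausts every finite bound, as it does Python's limit.
def is_oct_magic (number : Int) : Bool :=
  if number < 0 then false   -- A raises ValueError here: excluded by Pre_
  else
    match check_magic 30 (pvOctDigits number) with
    | some s => s == 1       -- try: check_magic(dig) == 1
    | none => false          -- except RecursionError: return False

-- ===== PORT B =====
-- the while True loop of Source B; fuel never runs out in the domain (the trajectory revisits a
-- seen value or drops below 8 within a dozen steps), the 0-fuel false is unreachable there.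
def is_oct_magic_alt_loop : Nat → Int → PySem.Set Int → Bool
  | 0, _, _ => false
  | fuel + 1, n, seen =>
    let s := ((pvOctDigits n).map (fun d => d ^ 2)).sum
    if s < 8 then s == 1
    else if PySem.Set.contains seen s then false
    else is_oct_magic_alt_loop fuel s (PySem.Set.add seen s)

def is_oct_magic_alt (number : Int) : Bool :=
  if number < 0 then false   -- B raises ValueError here: excluded by Pre_
  else is_oct_magic_alt_loop 30 number PySem.Set.empty

-- ===== PRECONDITION & SPEC =====
-- Pre_ excludes exactly the negative numbers, on which both A and B raise ValueError.
def Pre_is_oct_magic (number : Int) : Prop := 0 ≤ number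
instance (number : Int) : Decidable (Pre_is_oct_magic number) := by unfold Pre_is_oct_magic; infer_instance
def pvWitness_is_oct_magic : Int := 7

def Spec_is_oct_magic (number : Int) (out : Bool) : Prop := out = is_oct_magic_alt number
instance (number : Int) (out : Bool) : Decidable (Spec_is_oct_magic number out) := by unfold Spec_is_oct_magic; infer_instance

-- ===== CLAIM (what is proved, stated in full; the proofs are below) =====
def Claim_equal_is_oct_magic : Prop := ∀ (number : Int), Dom_is_oct_magic number → Pre_is_oct_magic number → Spec_is_oct_magic number (is_oct_magic number)

-- ===== LEMMAS AND PROOFS =====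

-- the sum of squares of the octal digits; both ports apply their tail to this value
def pvS (n : Int) : Int := ((pvOctDigits n).map (fun i => i ^ 2)).sum

-- everything A does after computing the first digit-square sum s
def pvAtail (s : Int) : Bool :=
  if s < 8 ∧ 0 ≤ s then s == 1
  else
    match pvCheckWhile (fun t => check_magic 29 (pvOctDigits t)) 30 s with
    | some s' => s' == 1
    | none => false

-- everything B does after computing the first digit-square sum s
def pvBtail (s : Int) : Bool :=
  if s < 8 then s == 1
  else if PySem.Set.contains PySem.Set.empty s then false
  else is_oct_magic_alt_loop 29 s (PySem.Set.add PySem.Set.empty s)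

lemma pvA_decomp (n : Int) (h : 0 ≤ n) : is_oct_magic n = pvAtail (pvS n) := by
  have e : check_magic 30 (pvOctDigits n)
      = (if pvS n < 8 ∧ 0 ≤ pvS n then some (pvS n)
         else pvCheckWhile (fun t => check_magic 29 (pvOctDigits t)) 30 (pvS n)) := rfl
  unfold is_oct_magic pvAtail
  rw [if_neg (by omega), e]
  by_cases hc : pvS n < 8 ∧ 0 ≤ pvS n
  · rw [if_pos hc, if_pos hc]
  · rw [if_neg hc, if_neg hc]

lemma pvB_decomp (n : Int) (h : 0 ≤ n) : is_oct_magic_alt n = pvBtail (pvS n) := by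
  have e : is_oct_magic_alt_loop 30 n PySem.Set.empty
      = (if pvS n < 8 then ((pvS n) == 1)
         else if PySem.Set.contains PySem.Set.empty (pvS n) then false
         else is_oct_magic_alt_loop 29 (pvS n) (PySem.Set.add PySem.Set.empty (pvS n))) := rfl
  unfold is_oct_magic_alt pvBtail
  rw [if_neg (by omega), e]

lemma pvS_nonneg (n : Int) : 0 ≤ pvS n := by
  unfold pvS
  apply List.sum_nonneg
  intro x hx
  rcases List.mem_map.mp hx with ⟨d, _, rfl⟩
  positivity

lemma pvAux_bound : ∀ (k fuel n : Nat), n < 8 ^ k →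
    (List.map (fun d : Nat => ((d : Int)) ^ 2) (pvOctDigitsAux fuel n)).sum ≤ 49 * k := by
  intro k
  induction k with
  | zero =>
    intro fuel n hn
    have hz : n = 0 := by omega
    subst hz
    cases fuel <;> simp [pvOctDigitsAux]
  | succ k ih =>
    intro fuel n hn
    cases fuel with
    | zero => simp [pvOctDigitsAux]; positivity
    | succ fuel =>
      by_cases h0 : n = 0
      · simp [pvOctDigitsAux, h0]; positivity
      · have hdiv : n / 8 < 8 ^ k := by
          apply Nat.div_lt_of_lt_mul
          calc n < 8 ^ (k + 1) := hn
            _ = 8 * 8 ^ k := by ring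
        have hrec := ih fuel (n / 8) hdiv
        have hmod : ((n % 8 : Nat) : Int) ^ 2 ≤ 49 := by
          have h7 : ((n % 8 : Nat) : Int) ≤ 7 := by exact_mod_cast Nat.le_of_lt_succ (Nat.mod_lt n (by norm_num))
          have h0' : (0 : Int) ≤ ((n % 8 : Nat) : Int) := by positivity
          nlinarith
        rw [pvOctDigitsAux, if_neg h0, List.map_append, List.sum_append]
        simp only [List.map_cons, List.map_nil, List.sum_cons, List.sum_nil, add_zero]
        have hsum := add_le_add hrec hmod
        push_cast
        push_cast at hsum
        linarith

lemma pvS_bound (n : Int) (h0 : 0 ≤ n) (h1 : n ≤ 2147483648) : pvS n ≤ 600 := by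
  unfold pvS pvOctDigits
  by_cases hz : n = 0
  · simp [hz]
  · rw [if_neg hz, List.map_map]
    have hlt : n.toNat < 8 ^ 11 := by omega
    have hb := pvAux_bound 11 n.toNat n.toNat hlt
    have he : ((fun i : Int => i ^ 2) ∘ (fun d : Nat => (d : Int))) = (fun d : Nat => ((d : Int)) ^ 2) := rfl
    rw [he]
    omega

lemma pvTail_eq : ∀ k : Nat, k ≤ 600 → pvAtail (k : Int) = pvBtail (k : Int) := by decide

-- ===== VERDICT (by name: the statement is the Claim_ definition above) =====
theorem is_oct_magic_spec : Claim_equal_is_oct_magic := by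
  intro number hdom hpre
  unfold Spec_is_oct_magic
  have h0 : 0 ≤ number := hpre
  have hub : number ≤ 2147483648 := by
    unfold Dom_is_oct_magic pvDomInt at hdom
    exact (of_decide_eq_true hdom).2
  rw [pvA_decomp number h0, pvB_decomp number h0]
  have hs0 := pvS_nonneg number
  have hs1 := pvS_bound number h0 hub
  have hrepr : pvS number = ((pvS number).toNat : Int) := (Int.toNat_of_nonneg hs0).symm
  rw [hrepr]
  exact pvTail_eq (pvS number).toNat (by omega)
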